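-- pv_equiv track=rewrite | github.com/tadhg-ohiggins/pywordcount | python/pywordcount/plugins/blog.py | pywordcountplugin
-- ===== SOURCE A (Python) =====
-- def pywordcountplugin(text):
--     """
--     We want to start on the third line, and end at ..container:: date.
--     """
--     nothing_below = ".. wordcountstop"
--     if not nothing_below in text:
--         nothing_below = ".. container:: date"
--     lines = text.split("\n")
--     if len(lines) > 2:
--         lines = lines[2:]
--     if len(lines):
--         newlines, include = [], True
--         for line in lines:
--             if line == nothing_below:
--                 include = False
--             if include:
--                 newlines.append(line)
--         text = "\n".join(newlines)
--     return text
-- ===== SOURCE B (Python) =====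
-- def pywordcountplugin(text):
--     marker = ".. wordcountstop"
--     if marker not in text:
--         marker = ".. container:: date"
--     lines = text.split("\n")
--     if len(lines) > 2:
--         lines = lines[2:]
--     if marker in lines:
--         lines = lines[:lines.index(marker)]
--     return "\n".join(lines)
-- ===== Notes on version B (the rewrite author's own statement) =====
-- stated objective: simpler
-- what changed: Replaces the flag-latched per-line accumulation loop with a find-position-then-slice: locate the stop marker with list.index and take the prefix before it (everything if absent), dropping A's always-true len(lines) check.
import Mathlib
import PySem

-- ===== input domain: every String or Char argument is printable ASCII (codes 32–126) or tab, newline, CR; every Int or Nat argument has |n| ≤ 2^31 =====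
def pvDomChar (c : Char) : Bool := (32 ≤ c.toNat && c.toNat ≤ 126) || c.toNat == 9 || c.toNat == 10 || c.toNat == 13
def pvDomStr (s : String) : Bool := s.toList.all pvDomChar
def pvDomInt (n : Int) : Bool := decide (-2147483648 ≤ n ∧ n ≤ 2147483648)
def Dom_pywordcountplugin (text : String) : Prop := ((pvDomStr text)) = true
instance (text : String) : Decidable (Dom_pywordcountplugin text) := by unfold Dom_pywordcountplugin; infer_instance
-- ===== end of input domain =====

-- ===== PORT A =====
-- A-side helper: the loop body of A's flag-latched accumulation (one step of 'for line in lines')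
def stepA (m : String) (st : List String × Bool) (line : String) : List String × Bool :=
  let include_ := if line = m then false else st.2
  (if include_ then st.1 ++ [line] else st.1, include_)

-- Port of A: flag-latched accumulation loop. B replaces it with find-position-then-slice (objective: simpler).
def pywordcountplugin (text : String) : String :=
  let nb0 := ".. wordcountstop"
  let nothing_below := if ! PySem.Str.isIn nb0 text then ".. container:: date" else nb0
  let lines0 := (PySem.Str.split? text "\n").getD []   -- sep is the nonempty literal "\n", so split? is always some
  let lines := if lines0.length > 2 then PySem.List.slice lines0 (some 2) none else lines0
  if lines.length ≠ 0 then
    PySem.Str.join "\n" (lines.foldl (stepA nothing_below) ([], true)).1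
  else text

-- ===== PORT B =====
def pywordcountplugin_alt (text : String) : String :=
  let marker := if PySem.Str.isIn ".. wordcountstop" text then ".. wordcountstop" else ".. container:: date"
  let lines0 := (PySem.Str.split? text "\n").getD []
  let lines := if 2 < lines0.length then PySem.List.slice lines0 (some 2) none else lines0
  let kept := match PySem.List.index? lines marker with
    | some i => lines.take i
    | none => lines
  PySem.Str.join "\n" kept

-- ===== PRECONDITION & SPEC =====
def Spec_pywordcountplugin (text : String) (out : String) : Prop := out = pywordcountplugin_alt text
instance (text : String) (out : String) : Decidable (Spec_pywordcountplugin text out) := by unfold Spec_pywordcountplugin; infer_instance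

-- ===== CLAIM (what is proved, stated in full; the proofs are below) =====
def Claim_equal_pywordcountplugin : Prop := ∀ (text : String), Dom_pywordcountplugin text → Spec_pywordcountplugin text (pywordcountplugin text)

-- ===== LEMMAS AND PROOFS =====

lemma splitOn_go_ne_nil (sep : List Char) : ∀ fuel l cur acc, PySem.Chars.splitOn.go sep fuel l cur acc ≠ [] := by
  intro fuel
  induction fuel with
  | zero => intro l cur acc; simp [PySem.Chars.splitOn.go]
  | succ n ih =>
    intro l cur acc
    cases l with
    | nil => simp [PySem.Chars.splitOn.go]
    | cons c rest =>
      rw [PySem.Chars.splitOn.go]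
      split
      · exact ih _ _ _
      · exact ih _ _ _

lemma split_nl_ne_nil (text : String) : (PySem.Str.split? text "\n").getD [] ≠ [] := by
  have h := PySem.Str.split?_map text "\n"
  have hc : PySem.Chars.split? text.toList "\n".toList
      = some (PySem.Chars.splitOn text.toList "\n".toList) := rfl
  rw [hc] at h
  cases hs : PySem.Str.split? text "\n" with
  | none => rw [hs] at h; simp at h
  | some ls =>
    rw [hs] at h
    simp only [Option.map_some, Option.some.injEq] at h
    intro hnil
    simp only [Option.getD_some] at hnil
    subst hnil
    simp only [List.map_nil] at h
    exact splitOn_go_ne_nil _ _ _ _ _ h.symm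

lemma loop_false (m : String) (lines : List String) (acc : List String) :
    lines.foldl (stepA m) (acc, false) = (acc, false) := by
  induction lines generalizing acc with
  | nil => rfl
  | cons l ls ih =>
    have hs : stepA m (acc, false) l = (acc, false) := by simp [stepA]
    rw [List.foldl_cons, hs, ih]

lemma loop_eq_index (m : String) : ∀ (lines acc : List String),
    (lines.foldl (stepA m) (acc, true)).1
    = acc ++ (match PySem.List.index? lines m with | some i => lines.take i | none => lines) := by
  intro lines
  induction lines with
  | nil => intro acc; simp [PySem.List.index?]
  | cons l ls ih =>
    intro acc
    by_cases h : l = m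
    · subst h
      rw [PySem.List.index?_cons_self]
      have hs : stepA l (acc, true) l = (acc, false) := by simp [stepA]
      rw [List.foldl_cons, hs, loop_false]
      simp
    · rw [PySem.List.index?_cons_of_ne ls h]
      have hs : stepA m (acc, true) l = (acc ++ [l], true) := by simp [stepA, h]
      rw [List.foldl_cons, hs, ih (acc ++ [l])]
      cases hi : PySem.List.index? ls m with
      | none => simp
      | some i => simp [List.take_succ_cons]

theorem pywordcountplugin_eq (text : String) : pywordcountplugin text = pywordcountplugin_alt text := by
  unfold pywordcountplugin pywordcountplugin_alt
  have hmk : (if ! PySem.Str.isIn ".. wordcountstop" text then ".. container:: date" else ".. wordcountstop")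
      = (if PySem.Str.isIn ".. wordcountstop" text then ".. wordcountstop" else ".. container:: date") := by
    cases PySem.Str.isIn ".. wordcountstop" text <;> simp
  simp only []
  rw [hmk]
  have hne : (PySem.Str.split? text "\n").getD [] ≠ [] := split_nl_ne_nil text
  set lines0 := (PySem.Str.split? text "\n").getD [] with hl0
  have hlen : (if lines0.length > 2 then PySem.List.slice lines0 (some 2) none else lines0).length ≠ 0 := by
    split
    · rename_i hgt
      rw [PySem.List.slice_from lines0 (by norm_num)]
      simp only [List.length_drop]
      omega
    · simpa [List.length_eq_zero_iff] using hne
  rw [if_pos hlen]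
  rw [loop_eq_index]
  simp

-- ===== VERDICT (by name: the statement is the Claim_ definition above) =====
theorem pywordcountplugin_spec : Claim_equal_pywordcountplugin := by
  intro text _
  exact pywordcountplugin_eq text
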